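-- pv_equiv track=rewrite | github.com/s0ojin/BOJ_javascript | 프로그래머스/1/42862. 체육복/체육복.py | solution
-- ===== SOURCE A (Python) =====
-- def solution(n, lost, reserve):
--     # 여분이 있지만 도난당한 학생을 제외
--     reserve_set = set(reserve) - set(lost)
--     lost_set = set(lost) - set(reserve)
--
--     # 여분의 체육복을 빌려줄 수 있는 경우 처리
--     for r in sorted(reserve_set):
--         if r - 1 in lost_set:
--             lost_set.remove(r - 1)
--         elif r + 1 in lost_set:
--             lost_set.remove(r + 1)
--
--     # 체육복을 입을 수 있는 학생 수 계산
--     return n - len(lost_set)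
-- ===== SOURCE B (Python) =====
-- def solution(n, lost, reserve):
--     # Two-pointer merge over sorted deduplicated lists instead of set membership/removal.
--     L = sorted(set(lost) - set(reserve))
--     R = sorted(set(reserve) - set(lost))
--     i = 0
--     matches = 0
--     for r in R:
--         while i < len(L) and L[i] < r - 1:
--             i += 1
--         if i < len(L) and (L[i] == r - 1 or L[i] == r + 1):
--             matches += 1
--             i += 1
--     return n - (len(L) - matches)
-- ===== Notes on version B (the rewrite author's own statement) =====
-- stated objective: alternative
-- what changed: Replaces A's hash-set membership tests and removals over an unordered lost set with a single two-pointer merge over the sorted deduplicated lost list, counting matches instead of deleting elements.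
import Mathlib
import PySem

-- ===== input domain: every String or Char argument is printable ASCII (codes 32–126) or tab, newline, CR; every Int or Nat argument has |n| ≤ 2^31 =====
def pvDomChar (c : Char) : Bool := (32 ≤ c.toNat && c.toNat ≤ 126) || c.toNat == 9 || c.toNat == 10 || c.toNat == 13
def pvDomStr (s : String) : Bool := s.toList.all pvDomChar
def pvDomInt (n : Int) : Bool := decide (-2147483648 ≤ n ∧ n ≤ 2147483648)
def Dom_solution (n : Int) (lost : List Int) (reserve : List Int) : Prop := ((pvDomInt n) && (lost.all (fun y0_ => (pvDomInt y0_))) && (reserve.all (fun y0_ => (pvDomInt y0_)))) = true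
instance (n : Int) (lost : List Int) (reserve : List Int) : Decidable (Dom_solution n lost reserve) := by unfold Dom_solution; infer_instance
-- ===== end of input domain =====

-- B replaces A's set-membership/removal greedy with a two-pointer merge over the sorted
-- deduplicated lost list (objective: alternative; same return value everywhere).

-- ===== PORT A =====
-- one loop iteration of A: if r-1 in lost_set: lost_set.remove(r-1) elif r+1 in lost_set: lost_set.remove(r+1)
-- (lost_set.remove(x) is guarded by the membership test, so PySem.Set.remove? is always `some`; getD is exact)
def solutionStepA (ls : PySem.Set Int) (r : Int) : PySem.Set Int :=
  if PySem.Set.contains ls (r - 1) then (PySem.Set.remove? ls (r - 1)).getD ls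
  else if PySem.Set.contains ls (r + 1) then (PySem.Set.remove? ls (r + 1)).getD ls
  else ls

def solution (n : Int) (lost : List Int) (reserve : List Int) : Int :=
  let reserveSet := PySem.Set.diff (PySem.Set.ofList reserve) (PySem.Set.ofList lost)
  let lostSet := PySem.Set.diff (PySem.Set.ofList lost) (PySem.Set.ofList reserve)
  let finalLost := (PySem.List.sorted reserveSet (fun x => x) false).foldl solutionStepA lostSet
  n - PySem.Set.len finalLost

-- ===== PORT B =====
-- Source B's inner `while i < len(L) and L[i] < r - 1: i += 1`
def solutionSkipB (L : List Int) (r : Int) (i : Nat) : Nat :=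
  if h : i < L.length then
    if L[i] < r - 1 then solutionSkipB L r (i + 1) else i
  else i
termination_by L.length - i

-- Source B's loop body for one r; state = (i, matches)
def solutionStepB (L : List Int) (st : Nat × Int) (r : Int) : Nat × Int :=
  let i := solutionSkipB L r st.1
  if h : i < L.length then
    if L[i] = r - 1 ∨ L[i] = r + 1 then (i + 1, st.2 + 1) else (i, st.2)
  else (i, st.2)

def solution_alt (n : Int) (lost : List Int) (reserve : List Int) : Int :=
  let L := PySem.List.sorted (PySem.Set.diff (PySem.Set.ofList lost) (PySem.Set.ofList reserve)) (fun x => x) false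
  let R := PySem.List.sorted (PySem.Set.diff (PySem.Set.ofList reserve) (PySem.Set.ofList lost)) (fun x => x) false
  let res := R.foldl (solutionStepB L) (0, 0)
  n - (PySem.List.len L - res.2)

-- ===== PRECONDITION & SPEC =====
def Spec_solution (n : Int) (lost : List Int) (reserve : List Int) (out : Int) : Prop := out = solution_alt n lost reserve
instance (n : Int) (lost : List Int) (reserve : List Int) (out : Int) : Decidable (Spec_solution n lost reserve out) := by unfold Spec_solution; infer_instance

-- ===== CLAIM (what is proved, stated in full; the proofs are below) =====
def Claim_equal_solution : Prop := ∀ (n : Int) (lost : List Int) (reserve : List Int), Dom_solution n lost reserve → Spec_solution n lost reserve (solution n lost reserve)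

-- ===== LEMMAS AND PROOFS =====

lemma mem_drop_iff_idx (L : List Int) (i : Nat) (x : Int) :
    x ∈ L.drop i ↔ ∃ j, ∃ _h : j < L.length, i ≤ j ∧ L[j] = x := by
  rw [List.mem_iff_getElem]
  constructor
  · rintro ⟨k, hk, hx⟩
    have hk' : i + k < L.length := by
      have := List.length_drop (i := i) (l := L) ▸ hk; omega
    refine ⟨i + k, hk', by omega, ?_⟩
    rw [← hx]
    exact (List.getElem_drop (h := hk)).symm
  · rintro ⟨j, hj, hij, hx⟩
    have hk : j - i < (L.drop i).length := by rw [List.length_drop]; omega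
    refine ⟨j - i, hk, ?_⟩
    rw [List.getElem_drop]
    have : i + (j - i) = j := by omega
    simp [this, hx]

lemma discard_eq_erase (l : List Int) (h : l.Nodup) (x : Int) :
    PySem.Set.discard l x = l.erase x := by
  simp [PySem.Set.discard, List.Nodup.erase_eq_filter h, bne]

lemma solutionSkipB_spec (L : List Int) (r : Int) :
    ∀ fuel i, L.length - i ≤ fuel → i ≤ L.length →
      i ≤ solutionSkipB L r i ∧ solutionSkipB L r i ≤ L.length ∧
      (∀ j (_hj : j < L.length), i ≤ j → j < solutionSkipB L r i → L[j] < r - 1) ∧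
      (∀ h : solutionSkipB L r i < L.length, ¬ L[solutionSkipB L r i] < r - 1) := by
  intro fuel
  induction fuel with
  | zero =>
    intro i hfuel hi
    have hs : solutionSkipB L r i = i := by rw [solutionSkipB, dif_neg (by omega)]
    rw [hs]
    exact ⟨le_refl _, hi, fun j hj hij hjs => by omega, fun hc => absurd hc (by omega)⟩
  | succ f ih =>
    intro i hfuel hi
    by_cases h : i < L.length
    · by_cases hlt : L[i] < r - 1
      · have hs : solutionSkipB L r i = solutionSkipB L r (i + 1) := by
          rw [solutionSkipB, dif_pos h, if_pos hlt]
        obtain ⟨h1, h2, h3, h4⟩ := ih (i + 1) (by omega) (by omega)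
        rw [hs]
        refine ⟨by omega, h2, ?_, h4⟩
        intro j hj hij hjs
        rcases Nat.eq_or_lt_of_le hij with rfl | hij'
        · exact hlt
        · exact h3 j hj (by omega) hjs
      · have hs : solutionSkipB L r i = i := by rw [solutionSkipB, dif_pos h, if_neg hlt]
        rw [hs]
        exact ⟨le_refl _, by omega, fun j hj hij hjs => by omega, fun _ => hlt⟩
    · have hs : solutionSkipB L r i = i := by rw [solutionSkipB, dif_neg h]
      rw [hs]
      exact ⟨le_refl _, hi, fun j hj hij hjs => by omega, fun hc => absurd hc h⟩

-- The core simulation: A's fold over the sorted reserves, carried out on the set `ls`,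
-- removes exactly as many elements as B's two-pointer fold counts matches.
lemma core (L : List Int) (hL : L.Pairwise (· < ·)) :
    ∀ (R : List Int), R.Pairwise (· < ·) → (∀ r ∈ R, r ∉ L) →
    ∀ (ls : List Int) (i : Nat) (m : Int), ls.Nodup → i ≤ L.length →
    (∀ x ∈ L.drop i, x ∈ ls) →
    (∀ x ∈ ls, x ∈ L.drop i ∨ ∀ r ∈ R, x < r - 1) →
    ((R.foldl solutionStepA ls).length : Int)
      = ls.length - ((R.foldl (solutionStepB L) (i, m)).2 - m) := by
  have hmono : ∀ j k (hj : j < L.length) (hk : k < L.length), j < k → L[j] < L[k] :=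
    fun j k hj hk hjk => List.pairwise_iff_getElem.mp hL j k hj hk hjk
  intro R
  induction R with
  | nil => intro _ _ ls i m _ _ _ _; simp
  | cons r R' ih =>
    intro hR hdisj ls i m hnd hi hdrop hdead
    obtain ⟨hs1, hs2, hs3, hs4⟩ :=
      solutionSkipB_spec L r (L.length - i) i (le_refl _) hi
    set i' := solutionSkipB L r i with hi'def
    have hrR : ∀ r' ∈ R', r < r' := by
      intro r' hr'; exact (List.pairwise_cons.mp hR).1 r' hr'
    have hR' : R'.Pairwise (· < ·) := (List.pairwise_cons.mp hR).2
    have hdisj' : ∀ r' ∈ R', r' ∉ L := fun r' hr' => hdisj r' (List.mem_cons_of_mem _ hr')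
    -- membership of v ∈ ls for v ∈ {r-1, r+1}: decided by L[i']
    have hmem_ls : ∀ v : Int, r - 1 ≤ v → v ∈ ls →
        ∃ j, ∃ _h : j < L.length, i' ≤ j ∧ L[j] = v := by
      intro v hv hvls
      rcases hdead v hvls with hdrop' | hdead'
      · obtain ⟨j, hj, hij, hx⟩ := (mem_drop_iff_idx L i v).mp hdrop'
        refine ⟨j, hj, ?_, hx⟩
        by_contra hji
        exact absurd (hx ▸ hs3 j hj hij (by omega)) (by omega)
      · have := hdead' r (List.mem_cons_self)
        omega
    -- characterization c1
    have c1 : (r - 1) ∈ ls ↔ ∃ _h : i' < L.length, L[i'] = r - 1 := by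
      constructor
      · intro hm
        obtain ⟨j, hj, hij, hx⟩ := hmem_ls (r - 1) (le_refl _) hm
        refine ⟨by omega, ?_⟩
        rcases Nat.eq_or_lt_of_le hij with rfl | hlt
        · exact hx
        · exfalso
          have hgt := hmono i' j (by omega) hj hlt
          rw [hx] at hgt
          exact hs4 (by omega) hgt
      · rintro ⟨h, hx⟩
        exact hdrop _ ((mem_drop_iff_idx L i (r - 1)).mpr ⟨i', h, hs1, hx⟩)
    -- characterization c2, assuming L[i'] is not r-1
    have c2 : (¬ ∃ _h : i' < L.length, L[i'] = r - 1) →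
        ((r + 1) ∈ ls ↔ ∃ _h : i' < L.length, L[i'] = r + 1) := by
      intro hno1
      constructor
      · intro hm
        obtain ⟨j, hj, hij, hx⟩ := hmem_ls (r + 1) (by omega) hm
        refine ⟨by omega, ?_⟩
        rcases Nat.eq_or_lt_of_le hij with rfl | hlt
        · exact hx
        · -- L[i'] < L[j] = r+1, L[i'] ≥ r-1, L[i'] ≠ r-1, L[i'] ≠ r → contradiction
          have h1 : L[i'] < r + 1 := hx ▸ hmono i' j (by omega) hj hlt
          have h2 : ¬ L[i'] < r - 1 := hs4 (by omega)
          have h3 : L[i'] ≠ r - 1 := fun hc => hno1 ⟨by omega, hc⟩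
          have h4 : L[i'] ≠ r := by
            intro hc
            exact hdisj r List.mem_cons_self (hc ▸ List.getElem_mem _)
          omega
      · rintro ⟨h, hx⟩
        exact hdrop _ ((mem_drop_iff_idx L i (r + 1)).mpr ⟨i', h, hs1, hx⟩)
    -- helper for re-establishing hdrop/hdead after a removal at i'
    have hdropsub : ∀ k, i' ≤ k → ∀ x ∈ L.drop k, x ∈ ls := by
      intro k hk x hx
      obtain ⟨j, hj, hij, hxx⟩ := (mem_drop_iff_idx L k x).mp hx
      exact hdrop x ((mem_drop_iff_idx L i x).mpr ⟨j, hj, by omega, hxx⟩)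
    have hdead_lt : ∀ x : Int, x < r - 1 → ∀ r' ∈ R', x < r' - 1 := by
      intro x hx r' hr'
      have := hrR r' hr'
      omega
    simp only [List.foldl_cons]
    by_cases hc1 : (r - 1) ∈ ls
    · -- A removes r-1 = L[i']; B matches, i := i'+1
      obtain ⟨hlen, hLi⟩ := c1.mp hc1
      have hstepA : solutionStepA ls r = ls.erase (r - 1) := by
        rw [solutionStepA]
        rw [if_pos ((PySem.Set.contains_iff ls (r - 1)).mpr hc1)]
        rw [PySem.Set.remove?, if_pos ((PySem.Set.contains_iff ls (r - 1)).mpr hc1)]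
        simp [discard_eq_erase ls hnd]
      have hstepB : solutionStepB L (i, m) r = (i' + 1, m + 1) := by
        rw [solutionStepB]
        simp only [← hi'def, hlen, dif_pos]
        rw [if_pos (Or.inl hLi)]
      rw [hstepA, hstepB]
      have hnd' : (ls.erase (r - 1)).Nodup := hnd.erase _
      have hdrop' : ∀ x ∈ L.drop (i' + 1), x ∈ ls.erase (r - 1) := by
        intro x hx
        obtain ⟨j, hj, hij, hxx⟩ := (mem_drop_iff_idx L (i' + 1) x).mp hx
        have hxls : x ∈ ls := hdropsub (i' + 1) (by omega) x hx
        have hne : x ≠ r - 1 := by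
          have hgt := hmono i' j hlen hj (by omega)
          rw [hLi, hxx] at hgt
          intro hc
          omega
        exact (hnd.mem_erase_iff).mpr ⟨hne, hxls⟩
      have hdead' : ∀ x ∈ ls.erase (r - 1), x ∈ L.drop (i' + 1) ∨ ∀ r' ∈ R', x < r' - 1 := by
        intro x hx
        obtain ⟨hne, hxls⟩ := (hnd.mem_erase_iff).mp hx
        rcases hdead x hxls with hd | hd
        · obtain ⟨j, hj, hij, hxx⟩ := (mem_drop_iff_idx L i x).mp hd
          by_cases hji : i' + 1 ≤ j
          · exact Or.inl ((mem_drop_iff_idx L (i' + 1) x).mpr ⟨j, hj, hji, hxx⟩)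
          · rcases Nat.lt_or_ge j i' with hj' | hj'
            · exact Or.inr (hdead_lt x (hxx ▸ hs3 j hj hij hj') )
            · have : j = i' := by omega
              subst this
              exact absurd (by rw [← hxx, hLi]) hne
        · exact Or.inr (fun r' hr' => hd r' (List.mem_cons_of_mem _ hr'))
      have hlen' : ((ls.erase (r - 1)).length : Int) = (ls.length : Int) - 1 := by
        rw [List.length_erase_of_mem hc1]
        have : 1 ≤ ls.length := List.length_pos_of_mem hc1
        omega
      have := ih hR' hdisj' (ls.erase (r - 1)) (i' + 1) (m + 1) hnd' (by omega) hdrop' hdead'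
      rw [this, hlen']
      ring
    · by_cases hc2 : (r + 1) ∈ ls
      · -- A removes r+1 = L[i']; B matches, i := i'+1
        have hno1 : ¬ ∃ _h : i' < L.length, L[i'] = r - 1 := fun hc => hc1 (c1.mpr hc)
        obtain ⟨hlen, hLi⟩ := (c2 hno1).mp hc2
        have hstepA : solutionStepA ls r = ls.erase (r + 1) := by
          rw [solutionStepA]
          rw [if_neg (fun hc => hc1 ((PySem.Set.contains_iff ls (r - 1)).mp hc))]
          rw [if_pos ((PySem.Set.contains_iff ls (r + 1)).mpr hc2)]
          rw [PySem.Set.remove?, if_pos ((PySem.Set.contains_iff ls (r + 1)).mpr hc2)]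
          simp [discard_eq_erase ls hnd]
        have hstepB : solutionStepB L (i, m) r = (i' + 1, m + 1) := by
          rw [solutionStepB]
          simp only [← hi'def, hlen, dif_pos]
          rw [if_pos (Or.inr hLi)]
        rw [hstepA, hstepB]
        have hnd' : (ls.erase (r + 1)).Nodup := hnd.erase _
        have hdrop' : ∀ x ∈ L.drop (i' + 1), x ∈ ls.erase (r + 1) := by
          intro x hx
          obtain ⟨j, hj, hij, hxx⟩ := (mem_drop_iff_idx L (i' + 1) x).mp hx
          have hxls : x ∈ ls := hdropsub (i' + 1) (by omega) x hx
          have hne : x ≠ r + 1 := by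
            have hgt := hmono i' j hlen hj (by omega)
            rw [hLi, hxx] at hgt
            intro hc
            omega
          exact (hnd.mem_erase_iff).mpr ⟨hne, hxls⟩
        have hdead' : ∀ x ∈ ls.erase (r + 1), x ∈ L.drop (i' + 1) ∨ ∀ r' ∈ R', x < r' - 1 := by
          intro x hx
          obtain ⟨hne, hxls⟩ := (hnd.mem_erase_iff).mp hx
          rcases hdead x hxls with hd | hd
          · obtain ⟨j, hj, hij, hxx⟩ := (mem_drop_iff_idx L i x).mp hd
            by_cases hji : i' + 1 ≤ j
            · exact Or.inl ((mem_drop_iff_idx L (i' + 1) x).mpr ⟨j, hj, hji, hxx⟩)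
            · rcases Nat.lt_or_ge j i' with hj' | hj'
              · exact Or.inr (hdead_lt x (hxx ▸ hs3 j hj hij hj'))
              · have : j = i' := by omega
                subst this
                exact absurd (by rw [← hxx, hLi]) hne
          · exact Or.inr (fun r' hr' => hd r' (List.mem_cons_of_mem _ hr'))
        have hlen' : ((ls.erase (r + 1)).length : Int) = (ls.length : Int) - 1 := by
          rw [List.length_erase_of_mem hc2]
          have : 1 ≤ ls.length := List.length_pos_of_mem hc2
          omega
        have := ih hR' hdisj' (ls.erase (r + 1)) (i' + 1) (m + 1) hnd' (by omega) hdrop' hdead'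
        rw [this, hlen']
        ring
      · -- no match: A leaves ls, B keeps m, i := i'
        have hstepA : solutionStepA ls r = ls := by
          rw [solutionStepA]
          rw [if_neg (fun hc => hc1 ((PySem.Set.contains_iff ls (r - 1)).mp hc))]
          rw [if_neg (fun hc => hc2 ((PySem.Set.contains_iff ls (r + 1)).mp hc))]
        have hstepB : solutionStepB L (i, m) r = (i', m) := by
          rw [solutionStepB]
          simp only [← hi'def]
          by_cases hlen : i' < L.length
          · rw [dif_pos hlen]
            rw [if_neg]
            rintro (hL1 | hL2)
            · exact hc1 (c1.mpr ⟨hlen, hL1⟩)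
            · exact hc2 ((c2 (fun hc => hc1 (c1.mpr hc))).mpr ⟨hlen, hL2⟩)
          · rw [dif_neg hlen]
        rw [hstepA, hstepB]
        have hdrop' : ∀ x ∈ L.drop i', x ∈ ls := hdropsub i' (le_refl _)
        have hdead' : ∀ x ∈ ls, x ∈ L.drop i' ∨ ∀ r' ∈ R', x < r' - 1 := by
          intro x hxls
          rcases hdead x hxls with hd | hd
          · obtain ⟨j, hj, hij, hxx⟩ := (mem_drop_iff_idx L i x).mp hd
            by_cases hji : i' ≤ j
            · exact Or.inl ((mem_drop_iff_idx L i' x).mpr ⟨j, hj, hji, hxx⟩)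
            · exact Or.inr (hdead_lt x (hxx ▸ hs3 j hj hij (by omega)))
          · exact Or.inr (fun r' hr' => hd r' (List.mem_cons_of_mem _ hr'))
        exact ih hR' hdisj' ls i' m hnd hs2 hdrop' hdead'

lemma pairwise_lt_of_sorted_nodup (xs : List Int) (hnd : xs.Nodup) :
    (PySem.List.sorted xs (fun x => x) false).Pairwise (· < ·) := by
  have h1 : (PySem.List.sorted xs (fun x => x) false).Pairwise (· ≤ ·) :=
    PySem.List.sorted_pairwise xs (fun x => x)
  have h2 : (PySem.List.sorted xs (fun x => x) false).Nodup :=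
    ((PySem.List.sorted_perm xs (fun x => x) false).nodup_iff).mpr hnd
  exact (h1.and h2).imp (fun h => lt_of_le_of_ne h.1 h.2)

-- ===== VERDICT (by name: the statement is the Claim_ definition above) =====
theorem solution_spec : Claim_equal_solution := by
  intro n lost reserve _hdom
  unfold Spec_solution solution solution_alt
  set lostSet := PySem.Set.diff (PySem.Set.ofList lost) (PySem.Set.ofList reserve) with hlsdef
  set reserveSet := PySem.Set.diff (PySem.Set.ofList reserve) (PySem.Set.ofList lost) with hrsdef
  set L := PySem.List.sorted lostSet (fun x => x) false with hLdef
  set R := PySem.List.sorted reserveSet (fun x => x) false with hRdef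
  have hndls : lostSet.Nodup :=
    PySem.Set.nodup_diff _ _ (PySem.Set.nodup_ofList lost)
  have hndrs : reserveSet.Nodup :=
    PySem.Set.nodup_diff _ _ (PySem.Set.nodup_ofList reserve)
  have hL : L.Pairwise (· < ·) := pairwise_lt_of_sorted_nodup lostSet hndls
  have hR : R.Pairwise (· < ·) := pairwise_lt_of_sorted_nodup reserveSet hndrs
  have hdisj : ∀ r ∈ R, r ∉ L := by
    intro r hr hrL
    have h1 : r ∈ reserveSet := (PySem.List.mem_sorted _ _ _ r).mp hr
    have h2 : r ∈ lostSet := (PySem.List.mem_sorted _ _ _ r).mp hrL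
    rw [hrsdef] at h1
    rw [hlsdef] at h2
    have := (PySem.Set.mem_diff _ _ r).mp h1
    have := (PySem.Set.mem_diff _ _ r).mp h2
    have h3 : r ∈ lost := ((PySem.Set.mem_ofList lost r).mp ‹r ∈ PySem.Set.ofList lost ∧ r ∉ PySem.Set.ofList reserve›.1)
    exact absurd ((PySem.Set.mem_ofList lost r).mpr h3) ‹r ∈ PySem.Set.ofList reserve ∧ r ∉ PySem.Set.ofList lost›.2
  have hdrop : ∀ x ∈ L.drop 0, x ∈ lostSet := by
    intro x hx
    rw [List.drop_zero] at hx
    exact (PySem.List.mem_sorted _ _ _ x).mp hx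
  have hdead : ∀ x ∈ lostSet, x ∈ L.drop 0 ∨ ∀ r ∈ R, x < r - 1 := by
    intro x hx
    exact Or.inl (by rw [List.drop_zero]; exact (PySem.List.mem_sorted _ _ _ x).mpr hx)
  have hcore := core L hL R hR hdisj lostSet 0 0 hndls (by omega) hdrop hdead
  have hlen : L.length = lostSet.length := PySem.List.length_sorted _ _ _
  simp only [PySem.Set.len, PySem.List.len]
  rw [hcore, hlen]
  ring
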